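-- pv_equiv track=rewrite | github.com/moonshot728/Ethracer | HB/optimize_nodes.py | cart_input
-- ===== SOURCE A (Python) =====
-- from itertools import product
--
-- def cart_input(inputstr):
-- 	input_dict = {}
-- 	length = len(inputstr)
-- 	no_inputs = (len(inputstr)-8)//64
-- 	mutable = [0 for i in range(0, no_inputs)]
-- 	mutable_positions = []
-- 	final_input_strings = []
--
-- 	# Find the mutable inputs
-- 	for i in range(no_inputs):
-- 		temp_str = inputstr[8+i*64:8+i*64+64]
--
-- 		if int(temp_str, 16) < 2**30 or int(temp_str, 16) > int('f'*40, 16):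
-- 			mutable[i] = 1
-- 			mutable_positions.append(i)
-- 	immutable_positions = list(set(i for i in range(0, no_inputs))-set(mutable_positions))
--
-- 	all_poss = list(product(range(2), repeat = no_inputs))
-- 	all_poss.sort(key=sum, reverse=True)
--
-- 	for each_tuple in all_poss:
-- 		found = True
-- 		for pos in immutable_positions:
-- 			if not mutable[pos] == each_tuple[pos]:
-- 				found = False
-- 				break
--
-- 		if found:
-- 			string1 = inputstr[0:8]
-- 			string2 = inputstr[0:8]
-- 			count = 0
-- 			for eachpos in each_tuple:
-- 				if 0 == eachpos:
-- 					string1 += inputstr[8+count*64:8+count*64+64]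
-- 					string2 += inputstr[8+count*64:8+count*64+64]
--
-- 				if 1 == eachpos:
-- 					string1 += '1'.rjust(64,'0')
-- 					string2 += '3'.rjust(64,'0')
--
-- 				count+=1
-- 			final_input_strings.append(string1)
-- 			input_dict[string1] = string2
--
--
--
-- 	return final_input_strings, input_dict
-- ===== SOURCE B (Python) =====
-- def cart_input(inputstr):
--     header = inputstr[0:8]
--     n = (len(inputstr) - 8) // 64
--     chunks = [inputstr[8 + i * 64: 8 + i * 64 + 64] for i in range(n)]
--     one = '1'.rjust(64, '0')
--     three = '3'.rjust(64, '0')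
--     # one left-to-right pass over the slots: branch only at mutable slots,
--     # carrying (ones-count, string1, string2); prefix order = tuple lex order
--     combos = [(0, header, header)]
--     for c in chunks:
--         v = int(c, 16)
--         if v < 2 ** 30 or v > 16 ** 40 - 1:
--             combos = [nxt for (k, s1, s2) in combos
--                       for nxt in ((k, s1 + c, s2 + c), (k + 1, s1 + one, s2 + three))]
--         else:
--             combos = [(k, s1 + c, s2 + c) for (k, s1, s2) in combos]
--     # bucket by ones-count and emit counts descending
--     # (= A's sort by sum, descending, stable)
--     buckets = [[] for _ in range(n + 1)]
--     for (k, s1, s2) in combos: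
--         buckets[k].append((s1, s2))
--     final_input_strings = []
--     input_dict = {}
--     for bucket in reversed(buckets):
--         for (s1, s2) in bucket:
--             final_input_strings.append(s1)
--             input_dict[s1] = s2
--     return final_input_strings, input_dict
-- ===== Notes on version B (the rewrite author's own statement) =====
-- stated objective: alternative
-- what changed: Instead of generating all 2^n bit tuples with itertools.product, sorting them by sum and filtering out those that set an immutable slot, B makes one left-to-right pass over the n slots, branching only at the m mutable slots (building the output strings incrementally), and then emits the combinations bucketed by ones-count in descending order, which reproduces the stable sum-descending order exactly; it avoids the global sort and enumerates 2^m instead of 2^n candidates, but on inputs where every slot is mutable (m = n) the measured cost is the same.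
import Mathlib
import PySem

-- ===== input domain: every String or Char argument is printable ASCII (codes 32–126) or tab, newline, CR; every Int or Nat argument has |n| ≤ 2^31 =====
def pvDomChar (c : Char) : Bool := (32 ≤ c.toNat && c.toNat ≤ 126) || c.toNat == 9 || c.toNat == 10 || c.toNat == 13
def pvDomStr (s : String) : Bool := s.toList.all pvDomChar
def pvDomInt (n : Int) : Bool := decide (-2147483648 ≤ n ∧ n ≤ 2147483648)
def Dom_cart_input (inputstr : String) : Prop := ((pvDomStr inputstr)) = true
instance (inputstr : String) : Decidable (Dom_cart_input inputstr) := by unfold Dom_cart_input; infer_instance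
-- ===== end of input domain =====

-- B enumerates only the mutable slots' combinations in one left-to-right pass and buckets
-- them by ones-count instead of generating, sorting and filtering all 2^n bit tuples
-- (a different algorithm of the same measured cost on all-mutable inputs).

-- ===== PORT A =====

-- '1'.rjust(64, '0') — exact for fill character '0' and width ≥ length (the only uses here)
def pvRjust0 (s : List Char) (w : Nat) : List Char := List.replicate (w - s.length) '0' ++ s

-- list(itertools.product(range(2), repeat = n)) in its documented order (rightmost slot varies fastest)
def pvProdRep2 : Nat → List (List Int)
  | 0 => [[]]
  | n + 1 => (pvProdRep2 n).flatMap (fun t => [t ++ [0], t ++ [1]])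

def cart_input (inputstr : String) : List String × (List (String × String)) :=
  let cs := inputstr.toList
  let length : Int := PySem.List.len cs
  let no_inputs : Int := PySem.Int.floordiv (length - 8) 64
  let mutable0 : List Int := (PySem.List.pyRange 0 no_inputs 1).map (fun _ => 0)
  -- find the mutable inputs
  let st :=
    (PySem.List.pyRange 0 no_inputs 1).foldl (fun st i =>
      let temp_str := PySem.List.slice cs (some (8 + i * 64)) (some (8 + i * 64 + 64))
      -- int(temp_str, 16): 'none' = ValueError, excluded by Pre_
      if (PySem.Int.ofCharsBase? temp_str 16).getD 0 < 2 ^ 30 ∨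
          (PySem.Int.ofCharsBase? temp_str 16).getD 0 >
            (PySem.Int.ofCharsBase? (PySem.List.pyRepeat ['f'] 40) 16).getD 0 then
        (PySem.List.pySetD st.1 i 1, st.2 ++ [i])
      else st) (mutable0, ([] : List Int))
  let mutable := st.1
  let mutable_positions := st.2
  -- list(set(range(0, no_inputs)) - set(mutable_positions)); CPython's set iteration order is
  -- not modelled, but the list is only folded into an order-independent conjunction below
  let immutable_positions : List Int :=
    PySem.Set.diff (PySem.Set.ofList (PySem.List.pyRange 0 no_inputs 1)) mutable_positions
  let all_poss := PySem.List.sorted (pvProdRep2 no_inputs.toNat) (fun t => t.sum) true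
  let out :=
    all_poss.foldl (fun st each_tuple =>
      let found := immutable_positions.foldl (fun found pos =>
        if ¬ (PySem.List.pyGetD mutable pos 0 == PySem.List.pyGetD each_tuple pos 0) then false
        else found) true
      if found then
        let r := each_tuple.foldl (fun (r : List Char × List Char × Int) eachpos =>
          let s1 := if eachpos == 0 then
              r.1 ++ PySem.List.slice cs (some (8 + r.2.2 * 64)) (some (8 + r.2.2 * 64 + 64))
            else r.1
          let s2 := if eachpos == 0 then
              r.2.1 ++ PySem.List.slice cs (some (8 + r.2.2 * 64)) (some (8 + r.2.2 * 64 + 64))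
            else r.2.1
          let s1 := if eachpos == 1 then s1 ++ pvRjust0 ['1'] 64 else s1
          let s2 := if eachpos == 1 then s2 ++ pvRjust0 ['3'] 64 else s2
          (s1, s2, r.2.2 + 1))
          (PySem.List.slice cs none (some 8), PySem.List.slice cs none (some 8), (0 : Int))
        (st.1 ++ [String.ofList r.1], st.2.insert (String.ofList r.1) (String.ofList r.2.1))
      else st) (([] : List String), (PySem.Dict.empty : PySem.Dict String String))
  (out.1, out.2.items)

-- ===== PORT B =====
def cart_input_alt (inputstr : String) : List String × (List (String × String)) :=
  let cs := inputstr.toList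
  let header := PySem.List.slice cs none (some 8)
  let n : Nat := (PySem.Int.floordiv (PySem.List.len cs - 8) 64).toNat
  let chunks := (List.range n).map (fun (i : Nat) =>
    PySem.List.slice cs (some (8 + (i : Int) * 64)) (some (8 + (i : Int) * 64 + 64)))
  let one := pvRjust0 ['1'] 64
  let three := pvRjust0 ['3'] 64
  -- one pass over the slots, branching only at mutable slots
  let combos : List (Int × List Char × List Char) :=
    chunks.foldl (fun combos c =>
      let v := (PySem.Int.ofCharsBase? c 16).getD 0   -- int(c, 16); 'none' = ValueError, excluded by Pre_
      if v < 2 ^ 30 ∨ v > 16 ^ 40 - 1 then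
        combos.flatMap (fun r =>
          [(r.1, r.2.1 ++ c, r.2.2 ++ c), (r.1 + 1, r.2.1 ++ one, r.2.2 ++ three)])
      else
        combos.map (fun r => (r.1, r.2.1 ++ c, r.2.2 ++ c)))
      [((0 : Int), header, header)]
  -- bucket by ones-count (buckets[k].append(...) ported as a functional list update)
  let buckets : List (List (List Char × List Char)) :=
    combos.foldl (fun bs r => PySem.List.pySetD bs r.1 (PySem.List.pyGetD bs r.1 [] ++ [r.2]))
      (List.replicate (n + 1) [])
  -- emit counts descending
  let out := buckets.reverse.flatten.foldl (fun st p =>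
      (st.1 ++ [String.ofList p.1], st.2.insert (String.ofList p.1) (String.ofList p.2)))
      (([] : List String), (PySem.Dict.empty : PySem.Dict String String))
  (out.1, out.2.items)

-- ===== PRECONDITION & SPEC =====
-- Pre_ excludes exactly the inputs on which the Python A raises: strings shorter than 8
-- (ValueError from product's negative repeat) and strings with a 64-char block that
-- int(·, 16) rejects (ValueError).
def Pre_cart_input (inputstr : String) : Prop :=
  8 ≤ inputstr.toList.length ∧
  ∀ i < (inputstr.toList.length - 8) / 64,
    (PySem.Int.ofCharsBase? ((inputstr.toList.drop (8 + i * 64)).take 64) 16).isSome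
instance (inputstr : String) : Decidable (Pre_cart_input inputstr) := by
  unfold Pre_cart_input; infer_instance

def pvWitness_cart_input : String := "AABBCCDD"

def Spec_cart_input (inputstr : String) (out : List String × (List (String × String))) : Prop := out = cart_input_alt inputstr
instance (inputstr : String) (out : List String × (List (String × String))) : Decidable (Spec_cart_input inputstr out) := by unfold Spec_cart_input; infer_instance

-- ===== CLAIM (what is proved, stated in full; the proofs are below) =====
def Claim_equal_cart_input : Prop := ∀ (inputstr : String), Dom_cart_input inputstr → Pre_cart_input inputstr → Spec_cart_input inputstr (cart_input inputstr)


-- ===== LEMMAS AND PROOFS =====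

-- proof-level abbreviations for the two programs' shared ingredients
def pvChunk (cs : List Char) (j : Nat) : List Char :=
  PySem.List.slice cs (some (8 + (j : Int) * 64)) (some (8 + (j : Int) * 64 + 64))

def pvMut (c : List Char) : Bool :=
  decide ((PySem.Int.ofCharsBase? c 16).getD 0 < 2 ^ 30 ∨
          (PySem.Int.ofCharsBase? c 16).getD 0 > 16 ^ 40 - 1)

def pvOk (cs : List Char) (m : Nat) (t : List Int) : Bool :=
  decide (∀ j, j < m → pvMut (pvChunk cs j) = false → t.getD j 0 = 0)

def pvPair1 (cs : List Char) (h : List Char) (t : List Int) (c : Nat) : List Char :=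
  h ++ (t.zipIdx c).flatMap (fun p => if p.1 == 0 then pvChunk cs p.2 else pvRjust0 ['1'] 64)

def pvPair2 (cs : List Char) (h : List Char) (t : List Int) (c : Nat) : List Char :=
  h ++ (t.zipIdx c).flatMap (fun p => if p.1 == 0 then pvChunk cs p.2 else pvRjust0 ['3'] 64)

-- the common normal form both programs are reduced to
def pvCanon (cs : List Char) (n : Nat) : List String × (List (String × String)) :=
  let hdr := PySem.List.slice cs none (some 8)
  let kept := ((List.range (n + 1)).reverse).flatMap
    (fun (k : Nat) => (pvProdRep2 n).filter (fun t => pvOk cs n t && t.sum == (k : Int)))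
  let out := kept.foldl (fun st t =>
      (st.1 ++ [String.ofList (pvPair1 cs hdr t 0)],
       st.2.insert (String.ofList (pvPair1 cs hdr t 0)) (String.ofList (pvPair2 cs hdr t 0))))
    (([] : List String), (PySem.Dict.empty : PySem.Dict String String))
  (out.1, out.2.items)

-- int('f'*40, 16) is 16^40 - 1
theorem pvConstF : (PySem.Int.ofCharsBase? (PySem.List.pyRepeat ['f'] 40) 16).getD 0 = 16 ^ 40 - 1 := by
  decide

theorem pvProdRep2_mem {n : Nat} {t : List Int} (h : t ∈ pvProdRep2 n) :
    t.length = n ∧ ∀ x ∈ t, x = 0 ∨ x = 1 := by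
  induction n generalizing t with
  | zero => simp [pvProdRep2] at h; simp [h]
  | succ m ih =>
    simp only [pvProdRep2, List.mem_flatMap] at h
    obtain ⟨u, hu, ht⟩ := h
    obtain ⟨hl, he⟩ := ih hu
    simp only [List.mem_cons, List.not_mem_nil, or_false] at ht
    rcases ht with ht | ht <;> subst ht <;>
      refine ⟨by simp [hl], ?_⟩ <;> intro x hx <;> simp at hx <;>
      (rcases hx with hx | hx
       · exact he x hx
       · simp [hx])

theorem pvSum_bounds {t : List Int} (he : ∀ x ∈ t, x = 0 ∨ x = 1) :
    0 ≤ t.sum ∧ t.sum ≤ t.length := by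
  induction t with
  | nil => simp
  | cons x t ih =>
    have hx := he x (by simp)
    have := ih (fun y hy => he y (by simp [hy]))
    simp only [List.sum_cons, List.length_cons]
    rcases hx with h | h <;> subst h <;> push_cast <;> omega

theorem pvInsertBy_prepend {α : Type} (before : α → α → Bool) (x : α) (pre rest : List α)
    (h : ∀ y ∈ pre, before x y = false) :
    PySem.List.insertBy before x (pre ++ rest) = pre ++ PySem.List.insertBy before x rest := by
  induction pre with
  | nil => simp
  | cons y ys ih =>
    have hy := h y (by simp)
    simp only [List.cons_append, PySem.List.insertBy, hy, Bool.false_eq_true, if_false]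
    rw [ih (fun z hz => h z (by simp [hz]))]

theorem pvInsertBy_all {α : Type} (before : α → α → Bool) (x : α) (ys : List α)
    (h : ∀ y ∈ ys, before x y = true) :
    PySem.List.insertBy before x ys = x :: ys := by
  cases ys with
  | nil => rfl
  | cons y t => simp [PySem.List.insertBy, h y (by simp)]

theorem pvGroups_insert {α : Type} (key : α → Int) (K : Nat) (l : List α) (x : α)
    (hx : 0 ≤ key x ∧ key x < K) :
    PySem.List.insertBy (fun a b => decide (key b < key a)) x
      ((List.range K).reverse.flatMap (fun (k : Nat) => l.filter (fun y => key y == (k : Int))))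
    = (List.range K).reverse.flatMap (fun (k : Nat) => (l ++ [x]).filter (fun y => key y == (k : Int))) := by
  induction K generalizing l with
  | zero => exact absurd hx.2 (by omega)
  | succ K ih =>
    have hrange : (List.range (K + 1)).reverse = K :: (List.range K).reverse := by
      rw [List.range_succ, List.reverse_append]; simp
    rw [hrange, List.flatMap_cons, List.flatMap_cons]
    have hmem_rest : ∀ y ∈ (List.range K).reverse.flatMap
        (fun (k : Nat) => l.filter (fun y => key y == (k : Int))), key y < K := by
      intro y hy
      simp only [List.mem_flatMap, List.mem_reverse, List.mem_range, List.mem_filter,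
        beq_iff_eq] at hy
      obtain ⟨k, hk, _, hky⟩ := hy
      omega
    by_cases hK : key x = (K : Int)
    · rw [pvInsertBy_prepend _ _ _ _ (by
        intro y hy
        simp only [List.mem_filter, beq_iff_eq] at hy
        simp [hy.2, hK])]
      rw [pvInsertBy_all _ _ _ (by
        intro y hy
        simp only [decide_eq_true_eq, hK]
        exact hmem_rest y hy)]
      have h1 : (l ++ [x]).filter (fun y => key y == (K : Int))
          = l.filter (fun y => key y == (K : Int)) ++ [x] := by
        simp [List.filter_append, hK]
      have h2 : (List.range K).reverse.flatMap
            (fun (k : Nat) => (l ++ [x]).filter (fun y => key y == (k : Int)))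
          = (List.range K).reverse.flatMap (fun (k : Nat) => l.filter (fun y => key y == (k : Int))) := by
        apply List.flatMap_congr
        intro k hk
        simp only [List.mem_reverse, List.mem_range] at hk
        have : ¬ (key x == (k : Int)) = true := by simp [hK]; omega
        simp [List.filter_append, this]
      rw [h1, h2]
      simp
    · have hxK : 0 ≤ key x ∧ key x < K := by
        obtain ⟨h1, h2⟩ := hx
        constructor
        · exact h1
        · push_cast at h2 ⊢; omega
      rw [pvInsertBy_prepend _ _ _ _ (by
        intro y hy
        simp only [List.mem_filter, beq_iff_eq] at hy
        simp only [decide_eq_false_iff_not, not_lt, hy.2]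
        omega)]
      rw [ih l hxK]
      have h1 : (l ++ [x]).filter (fun y => key y == (K : Int))
          = l.filter (fun y => key y == (K : Int)) := by
        have : ¬ (key x == (K : Int)) = true := by simp [hK]
        simp [List.filter_append, this]
      rw [h1]

theorem pvSorted_rev_groups {α : Type} (key : α → Int) (K : Nat) (l : List α)
    (hb : ∀ x ∈ l, 0 ≤ key x ∧ key x < K) :
    PySem.List.sorted l key true
      = (List.range K).reverse.flatMap (fun (k : Nat) => l.filter (fun y => key y == (k : Int))) := by
  induction l using List.reverseRecOn with
  | nil =>
    have : PySem.List.sorted ([] : List α) key true = [] := rfl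
    rw [this]
    symm
    simp
  | append_singleton l x ih =>
    have hfold : PySem.List.sorted (l ++ [x]) key true
        = PySem.List.insertBy (fun a b => decide (key b < key a)) x
            (PySem.List.sorted l key true) := by
      rw [PySem.List.sorted_rev_eq_foldl_insertBy, PySem.List.sorted_rev_eq_foldl_insertBy,
        List.foldl_append]
      simp
    rw [hfold, ih (fun y hy => hb y (by simp [hy])), pvGroups_insert key K l x (hb x (by simp))]

theorem pvFilter_flatMapIf {α β : Type} (l : List α) (p : α → Bool) (g : α → List β) :
    (l.filter p).flatMap g = l.flatMap (fun t => if p t then g t else []) := by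
  induction l with
  | nil => rfl
  | cons x t ih =>
    by_cases hx : p x = true <;> simp [hx, ih]

theorem pvOk_append (cs : List Char) (m : Nat) (t : List Int) (e : Int) (hlen : t.length = m) :
    pvOk cs (m + 1) (t ++ [e]) = (pvOk cs m t && (pvMut (pvChunk cs m) || e == 0)) := by
  have h1 : ∀ j, j < m → (t ++ [e]).getD j 0 = t.getD j 0 := by
    intro j hj
    rw [List.getD_append]
    omega
  have h2 : (t ++ [e]).getD m 0 = e := by
    subst hlen
    simp [List.getD_eq_getElem?_getD]
  rw [Bool.eq_iff_iff]
  simp only [pvOk, Bool.and_eq_true, Bool.or_eq_true, decide_eq_true_eq, beq_iff_eq]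
  constructor
  · intro hall
    refine ⟨fun j hj hmf => ?_, ?_⟩
    · rw [← h1 j hj]
      exact hall j (by omega) hmf
    · rcases Bool.eq_false_or_eq_true (pvMut (pvChunk cs m)) with hm | hm
      · left
        exact hm
      · right
        have hme := hall m (by omega) hm
        rwa [h2] at hme
  · rintro ⟨hok, hor⟩ j hj hmf
    by_cases hjm : j < m
    · rw [h1 j hjm]
      exact hok j hjm hmf
    · have hjeq : j = m := by omega
      subst hjeq
      rw [h2]
      rcases hor with hm | he
      · rw [hmf] at hm
        cases hm
      · exact he


theorem pvPair1_append (cs h : List Char) (m : Nat) (t : List Int) (e : Int)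
    (hlen : t.length = m) :
    pvPair1 cs h (t ++ [e]) 0
      = pvPair1 cs h t 0 ++ (if e == 0 then pvChunk cs m else pvRjust0 ['1'] 64) := by
  simp [pvPair1, List.zipIdx_append, hlen]


theorem pvPair2_append (cs h : List Char) (m : Nat) (t : List Int) (e : Int)
    (hlen : t.length = m) :
    pvPair2 cs h (t ++ [e]) 0
      = pvPair2 cs h t 0 ++ (if e == 0 then pvChunk cs m else pvRjust0 ['3'] 64) := by
  simp [pvPair2, List.zipIdx_append, hlen]

theorem pvMapFilter_flatMapIf {α β : Type} (l : List α) (p : α → Bool) (f : α → β) :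
    (l.filter p).map f = l.flatMap (fun t => if p t then [f t] else []) := by
  induction l with
  | nil => rfl
  | cons x t ih =>
    by_cases hx : p x = true <;> simp [hx, ih]

-- the single pass of B over the chunk list builds exactly the pairs of the kept tuples,
-- in itertools.product order
theorem pvCoreB (cs h : List Char) (m : Nat) :
    ((List.range m).map (fun i => pvChunk cs i)).foldl
      (fun combos c =>
        if (PySem.Int.ofCharsBase? c 16).getD 0 < 2 ^ 30 ∨
            (PySem.Int.ofCharsBase? c 16).getD 0 > 16 ^ 40 - 1 then
          combos.flatMap (fun r =>
            [(r.1, r.2.1 ++ c, r.2.2 ++ c),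
             (r.1 + 1, r.2.1 ++ pvRjust0 ['1'] 64, r.2.2 ++ pvRjust0 ['3'] 64)])
        else
          combos.map (fun r => (r.1, r.2.1 ++ c, r.2.2 ++ c)))
      [((0 : Int), h, h)]
    = ((pvProdRep2 m).filter (pvOk cs m)).map
        (fun t => (t.sum, pvPair1 cs h t 0, pvPair2 cs h t 0)) := by
  induction m with
  | zero => simp [pvProdRep2, pvOk, pvPair1, pvPair2]
  | succ m ih =>
    rw [List.range_succ, List.map_append, List.foldl_append]
    simp only [List.map_cons, List.map_nil, List.foldl_cons, List.foldl_nil]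
    rw [ih]
    have hsplit : pvProdRep2 (m + 1) = (pvProdRep2 m).flatMap (fun t => [t ++ [0], t ++ [1]]) := rfl
    rw [hsplit, List.filter_flatMap, List.map_flatMap]
    by_cases hm : pvMut (pvChunk cs m) = true
    · rw [if_pos (of_decide_eq_true hm)]
      rw [List.flatMap_map, pvFilter_flatMapIf]
      apply List.flatMap_congr
      intro t ht
      obtain ⟨hlen, hent⟩ := pvProdRep2_mem ht
      rw [List.filter_cons, List.filter_cons, List.filter_nil]
      rw [pvOk_append _ _ _ _ hlen, pvOk_append _ _ _ _ hlen, hm]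
      by_cases hok : pvOk cs m t = true <;>
        simp [hok, pvPair1_append _ _ _ _ _ hlen, pvPair2_append _ _ _ _ _ hlen,
          List.sum_append]
    · rw [if_neg (fun hP => hm (by simp only [pvMut, decide_eq_true_eq]; exact hP))]
      rw [List.map_map, pvMapFilter_flatMapIf]
      apply List.flatMap_congr
      intro t ht
      obtain ⟨hlen, hent⟩ := pvProdRep2_mem ht
      rw [List.filter_cons, List.filter_cons, List.filter_nil]
      have hmf : pvMut (pvChunk cs m) = false := by
        simpa using hm
      rw [pvOk_append _ _ _ _ hlen, pvOk_append _ _ _ _ hlen, hmf]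
      by_cases hok : pvOk cs m t = true <;>
        simp [hok, pvPair1_append _ _ _ _ _ hlen, pvPair2_append _ _ _ _ _ hlen,
          List.sum_append]

theorem pvBucketize {β : Type} (n : Nat) (combos : List (Int × β))
    (hk : ∀ r ∈ combos, 0 ≤ r.1 ∧ r.1 ≤ n) :
    combos.foldl (fun bs r => PySem.List.pySetD bs r.1 (PySem.List.pyGetD bs r.1 [] ++ [r.2]))
        (List.replicate (n + 1) [])
      = (List.range (n + 1)).map
          (fun (k : Nat) => (combos.filter (fun r => r.1 == (k : Int))).map (fun r => r.2)) := by
  induction combos using List.reverseRecOn with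
  | nil => simp
  | append_singleton l r ih =>
    rw [List.foldl_append, ih (fun q hq => hk q (by simp [hq]))]
    simp only [List.foldl_cons, List.foldl_nil]
    obtain ⟨hr0, hrn⟩ := hk r (by simp)
    have hrK : r.1 = (r.1.toNat : Int) := by omega
    have hKn : r.1.toNat ≤ n := by omega
    have hlenm : ((List.range (n + 1)).map
        (fun (k : Nat) => (l.filter (fun q => q.1 == (k : Int))).map (fun q => q.2))).length = n + 1 := by
      simp
    rw [PySem.List.pySetD_of_nonneg _ _ hr0,
      PySem.List.pyGetD_eq_getElem _ _ hr0 (by simp; omega)]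
    apply List.ext_getElem
    · simp
    · intro i hi hi2
      simp only [List.length_set, hlenm] at hi
      rw [List.getElem_set]
      simp only [List.getElem_map, List.getElem_range,
        List.filter_append, List.map_append]
      by_cases hiK : r.1.toNat = i
      · subst hiK
        rw [if_pos rfl]
        simp [hr0]
      · rw [if_neg hiK]
        have hb : (r.1 == (i : Int)) = false := by simp; omega
        simp [hb]

theorem pvAlt_eq (s : String) (hlen : 8 ≤ s.toList.length) :
    cart_input_alt s = pvCanon s.toList ((s.toList.length - 8) / 64) := by
  have hno : PySem.Int.floordiv (PySem.List.len s.toList - 8) 64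
      = (((s.toList.length - 8) / 64 : Nat) : Int) := by
    rw [PySem.List.len_eq]
    rw [show ((s.toList.length : Int) - 8) = (((s.toList.length - 8 : Nat)) : Int) by omega]
    exact_mod_cast PySem.Int.floordiv_natCast (s.toList.length - 8) 64
  simp only [cart_input_alt, hno, Int.toNat_natCast]
  set cs := s.toList with hcs
  set n := (cs.length - 8) / 64 with hn
  have hchunks : (List.range n).map (fun (i : Nat) =>
        PySem.List.slice cs (some (8 + (i : Int) * 64)) (some (8 + (i : Int) * 64 + 64)))
      = (List.range n).map (fun i => pvChunk cs i) := rfl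
  rw [hchunks, pvCoreB cs (PySem.List.slice cs none (some 8)) n]
  have hbound : ∀ r ∈ ((pvProdRep2 n).filter (pvOk cs n)).map
      (fun t => (t.sum, pvPair1 cs (PySem.List.slice cs none (some 8)) t 0,
        pvPair2 cs (PySem.List.slice cs none (some 8)) t 0)),
      0 ≤ r.1 ∧ r.1 ≤ (n : Int) := by
    intro r hr
    simp only [List.mem_map, List.mem_filter] at hr
    obtain ⟨t, ⟨ht, _⟩, rfl⟩ := hr
    obtain ⟨hlen', hent⟩ := pvProdRep2_mem ht
    have hsb := pvSum_bounds hent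
    simp only [hlen'] at hsb
    exact ⟨hsb.1, by exact_mod_cast hsb.2⟩
  rw [pvBucketize n _ hbound]
  rw [← List.map_reverse, ← List.flatMap_def]
  simp only [List.filter_map, List.map_map, List.filter_filter]
  rw [← List.map_flatMap, List.foldl_map]
  simp only [pvCanon, Function.comp]
  have hand : ∀ (k : Nat), (fun (a : List Int) => a.sum == (k : Int) && pvOk cs n a)
      = (fun (t : List Int) => pvOk cs n t && t.sum == (k : Int)) := by
    intro k
    funext t
    exact Bool.and_comm _ _
  simp only [hand]

-- A's first loop: the indicator list and the list of mutable positions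
theorem pvMutLoop (cs : List Char) (n : Nat) :
    ∀ (i : Nat), i ≤ n →
    List.foldl (fun (st : List Int × List Int) (i : Int) =>
        if (PySem.Int.ofCharsBase? (PySem.List.slice cs (some (8 + i * 64)) (some (8 + i * 64 + 64))) 16).getD 0 < 2 ^ 30 ∨
            (PySem.Int.ofCharsBase? (PySem.List.slice cs (some (8 + i * 64)) (some (8 + i * 64 + 64))) 16).getD 0 > 16 ^ 40 - 1
        then (PySem.List.pySetD st.1 i 1, st.2 ++ [i]) else st)
      ((List.range n).map (fun _ => (0 : Int)), ([] : List Int))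
      ((List.range i).map (fun (k : Nat) => (k : Int)))
    = ((List.range n).map (fun j => if j < i ∧ pvMut (pvChunk cs j) = true then (1 : Int) else (0 : Int)),
       ((List.range i).filter (fun j => pvMut (pvChunk cs j))).map (fun (j : Nat) => (j : Int))) := by
  intro i hi
  induction i with
  | zero => simp
  | succ i ih =>
    rw [List.range_succ, List.map_append, List.foldl_append, ih (by omega)]
    simp only [List.map_cons, List.map_nil, List.foldl_cons, List.foldl_nil]
    simp only [show ∀ (j : Nat), PySem.List.slice cs (some (8 + (j : Int) * 64))
        (some (8 + (j : Int) * 64 + 64)) = pvChunk cs j from fun _ => rfl]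
    by_cases hm : pvMut (pvChunk cs i) = true
    · rw [if_pos (of_decide_eq_true hm)]
      refine Prod.ext ?_ ?_
      · show PySem.List.pySetD _ ((i : Nat) : Int) 1 = _
        rw [PySem.List.pySetD_natCast]
        apply List.ext_getElem
        · simp
        · intro j hj hj2
          simp only [List.length_set, List.length_map, List.length_range] at hj
          rw [List.getElem_set]
          simp only [List.getElem_map, List.getElem_range]
          by_cases hji : i = j
          · subst hji
            simp [hm]
          · rw [if_neg hji]
            have : (j < i ∧ pvMut (pvChunk cs j) = true) ↔ (j < i + 1 ∧ pvMut (pvChunk cs j) = true) := by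
              constructor
              · rintro ⟨h1, h2⟩; exact ⟨by omega, h2⟩
              · rintro ⟨h1, h2⟩
                refine ⟨?_, h2⟩
                rcases Nat.lt_succ_iff_lt_or_eq.mp h1 with h | h
                · exact h
                · exact absurd h.symm hji
            simp only [this]
      · show _ ++ [((i : Nat) : Int)] = _
        rw [List.filter_append, List.map_append]
        simp [hm]
    · rw [if_neg (fun hP => hm (by simp only [pvMut, decide_eq_true_eq]; exact hP))]
      have hmf : pvMut (pvChunk cs i) = false := by simpa using hm
      refine Prod.ext ?_ ?_
      · show List.map _ _ = _
        apply List.map_congr_left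
        intro j hj
        have : (j < i ∧ pvMut (pvChunk cs j) = true) ↔ (j < i + 1 ∧ pvMut (pvChunk cs j) = true) := by
          constructor
          · rintro ⟨h1, h2⟩; exact ⟨by omega, h2⟩
          · rintro ⟨h1, h2⟩
            refine ⟨?_, h2⟩
            rcases Nat.lt_succ_iff_lt_or_eq.mp h1 with h | h
            · exact h
            · subst h; rw [h2] at hmf; cases hmf
        simp only [this]
      · show List.map _ _ = _
        rw [List.filter_append]
        simp [hmf]

theorem pvFoldBreak {α : Type} (l : List α) (f g : α → Int) : ∀ b : Bool,
    l.foldl (fun ok pos => if ¬ ((f pos == g pos) = true) then false else ok) b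
      = (b && l.all (fun pos => f pos == g pos)) := by
  induction l with
  | nil => intro b; simp
  | cons x tl ih =>
    intro b
    simp only [List.foldl_cons, List.all_cons]
    by_cases hx : (f x == g x) = true
    · rw [if_neg (by simp [hx])]
      rw [ih b, hx]
      simp
    · rw [if_pos hx]
      rw [ih false]
      have hxf : (f x == g x) = false := by simpa using hx
      simp [hxf]

-- A's found flag over the immutable positions is pvOk
theorem pvFound (cs : List Char) (n : Nat) (t : List Int) (_hlen : t.length = n) :
    ((PySem.Set.ofList ((List.range n).map (fun (k : Nat) => (k : Int)))).diff
        (((List.range n).filter (fun j => pvMut (pvChunk cs j))).map (fun (j : Nat) => (j : Int)))).foldl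
      (fun found pos =>
        if ¬ ((PySem.List.pyGetD ((List.range n).map (fun j =>
              if pvMut (pvChunk cs j) = true then (1 : Int) else 0)) pos 0
            == PySem.List.pyGetD t pos 0) = true) then false else found) true
    = pvOk cs n t := by
  rw [pvFoldBreak]
  rw [Bool.true_and, Bool.eq_iff_iff]
  simp only [List.all_eq_true, pvOk, decide_eq_true_eq]
  constructor
  · intro hall j hj hmf
    have hmem : ((j : Nat) : Int) ∈ (PySem.Set.ofList ((List.range n).map (fun (k : Nat) => (k : Int)))).diff
        (((List.range n).filter (fun j => pvMut (pvChunk cs j))).map (fun (j : Nat) => (j : Int))) := by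
      rw [PySem.Set.mem_diff]
      constructor
      · rw [PySem.Set.mem_ofList]
        simp only [List.mem_map, List.mem_range]
        exact ⟨j, hj, rfl⟩
      · intro hc
        simp only [List.mem_map, List.mem_filter, List.mem_range] at hc
        obtain ⟨j', ⟨_, hmut⟩, hcast⟩ := hc
        have : j' = j := by exact_mod_cast hcast
        subst this
        rw [hmut] at hmf
        cases hmf
    have hb := hall _ hmem
    rw [PySem.List.pyGetD_natCast, PySem.List.pyGetD_natCast,
      PySem.List.getD_map_range _ _ _ _ hj] at hb
    simp only [hmf, Bool.false_eq_true, if_false, beq_iff_eq] at hb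
    omega
  · intro hok pos hpos
    rw [PySem.Set.mem_diff, PySem.Set.mem_ofList] at hpos
    obtain ⟨hin, hnot⟩ := hpos
    simp only [List.mem_map, List.mem_range] at hin
    obtain ⟨j, hj, rfl⟩ := hin
    have hmf : pvMut (pvChunk cs j) = false := by
      rcases Bool.eq_false_or_eq_true (pvMut (pvChunk cs j)) with h | h
      · exfalso
        apply hnot
        simp only [List.mem_map, List.mem_filter, List.mem_range]
        exact ⟨j, ⟨hj, h⟩, rfl⟩
      · exact h
    rw [PySem.List.pyGetD_natCast, PySem.List.pyGetD_natCast,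
      PySem.List.getD_map_range _ _ _ _ hj, hmf]
    have hgd := hok j hj hmf
    simp only [List.getD_eq_getElem?_getD] at hgd
    simp [hgd]

-- A's inner build loop over one tuple
theorem pvBuildA (cs : List Char) (t : List Int) :
    (∀ x ∈ t, x = 0 ∨ x = 1) → ∀ (c : Nat) (h1 h2 : List Char),
    t.foldl (fun (r : List Char × List Char × Int) (eachpos : Int) =>
      (if eachpos == 1 then
          (if eachpos == 0 then
            r.1 ++ PySem.List.slice cs (some (8 + r.2.2 * 64)) (some (8 + r.2.2 * 64 + 64))
          else r.1) ++ pvRjust0 ['1'] 64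
        else
          if eachpos == 0 then
            r.1 ++ PySem.List.slice cs (some (8 + r.2.2 * 64)) (some (8 + r.2.2 * 64 + 64))
          else r.1,
       if eachpos == 1 then
          (if eachpos == 0 then
            r.2.1 ++ PySem.List.slice cs (some (8 + r.2.2 * 64)) (some (8 + r.2.2 * 64 + 64))
          else r.2.1) ++ pvRjust0 ['3'] 64
        else
          if eachpos == 0 then
            r.2.1 ++ PySem.List.slice cs (some (8 + r.2.2 * 64)) (some (8 + r.2.2 * 64 + 64))
          else r.2.1,
       r.2.2 + 1)) (h1, h2, (c : Int))
    = (pvPair1 cs h1 t c, pvPair2 cs h2 t c, (c : Int) + t.length) := by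
  induction t with
  | nil =>
    intro _ c h1 h2
    simp [pvPair1, pvPair2]
  | cons x tl ih =>
    intro hent c h1 h2
    have hx := hent x (by simp)
    have htl : ∀ y ∈ tl, y = 0 ∨ y = 1 := fun y hy => hent y (by simp [hy])
    simp only [List.foldl_cons]
    rcases hx with hx | hx <;> subst hx
    · simp only [show ((0 : Int) == 1) = false by decide, show ((0 : Int) == 0) = true by decide,
        if_true, if_false, Bool.false_eq_true]
      rw [show ((c : Int) + 1) = (((c + 1 : Nat)) : Int) by push_cast; ring]
      rw [ih htl (c + 1) _ _]
      simp only [pvPair1, pvPair2, List.zipIdx_cons, List.flatMap_cons,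
        show ((0 : Int) == 0) = true by decide, if_true, List.length_cons]
      refine Prod.ext ?_ (Prod.ext ?_ ?_) <;> simp [List.append_assoc, pvChunk] <;> push_cast <;> ring
    · simp only [show ((1 : Int) == 1) = true by decide, show ((1 : Int) == 0) = false by decide,
        if_true, if_false, Bool.false_eq_true]
      rw [show ((c : Int) + 1) = (((c + 1 : Nat)) : Int) by push_cast; ring]
      rw [ih htl (c + 1) _ _]
      simp only [pvPair1, pvPair2, List.zipIdx_cons, List.flatMap_cons,
        show ((1 : Int) == 0) = false by decide, if_false, List.length_cons, Bool.false_eq_true]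
      refine Prod.ext ?_ (Prod.ext ?_ ?_) <;> simp [List.append_assoc, pvChunk] <;> push_cast <;> ring

theorem pvA_eq (s : String) (hlen : 8 ≤ s.toList.length) :
    cart_input s = pvCanon s.toList ((s.toList.length - 8) / 64) := by
  have hno : PySem.Int.floordiv (PySem.List.len s.toList - 8) 64
      = (((s.toList.length - 8) / 64 : Nat) : Int) := by
    rw [PySem.List.len_eq]
    rw [show ((s.toList.length : Int) - 8) = (((s.toList.length - 8 : Nat)) : Int) by omega]
    exact_mod_cast PySem.Int.floordiv_natCast (s.toList.length - 8) 64
  simp only [cart_input, hno, Int.toNat_natCast, pvConstF, PySem.List.pyRange_zero_nat,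
    List.map_map]
  set cs := s.toList with hcs
  set n := (cs.length - 8) / 64 with hn
  simp only [Function.comp_def]
  simp only [pvMutLoop cs n n le_rfl]
  have hMclean : ((List.range n).map (fun j =>
        if j < n ∧ pvMut (pvChunk cs j) = true then (1 : Int) else 0))
      = (List.range n).map (fun j => if pvMut (pvChunk cs j) = true then (1 : Int) else 0) :=
    List.map_congr_left (fun j hj => by simp [List.mem_range.mp hj])
  rw [hMclean]
  rw [pvSorted_rev_groups (fun (t : List Int) => t.sum) (n + 1) (pvProdRep2 n) (by
    intro t ht
    obtain ⟨hl, he⟩ := pvProdRep2_mem ht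
    have hsb := pvSum_bounds he
    rw [hl] at hsb
    exact ⟨hsb.1, by push_cast; omega⟩)]
  rw [PySem.List.foldl_congr_mem _ _ (fun (st : List String × PySem.Dict String String) t =>
    if pvOk cs n t then
      (st.1 ++ [String.ofList (pvPair1 cs (PySem.List.slice cs none (some 8)) t 0)],
       st.2.insert (String.ofList (pvPair1 cs (PySem.List.slice cs none (some 8)) t 0))
         (String.ofList (pvPair2 cs (PySem.List.slice cs none (some 8)) t 0)))
    else st) _ ?hbody]
  case hbody =>
    intro st t ht
    have htp : t ∈ pvProdRep2 n := by
      simp only [List.mem_flatMap, List.mem_filter] at ht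
      obtain ⟨k, _, ht, _⟩ := ht
      exact ht
    obtain ⟨hlen', hent⟩ := pvProdRep2_mem htp
    rw [pvFound cs n t hlen']
    have hb0 := pvBuildA cs t hent 0
      (PySem.List.slice cs none (some 8)) (PySem.List.slice cs none (some 8))
    simp only [Nat.cast_zero] at hb0
    rw [hb0]
  rw [PySem.List.foldl_if_eq_foldl_filter]
  rw [List.filter_flatMap]
  simp only [List.filter_filter]
  simp only [pvCanon]

-- ===== VERDICT (by name: the statement is the Claim_ definition above) =====
theorem cart_input_spec : Claim_equal_cart_input := by
  intro s hdom hpre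
  unfold Spec_cart_input
  rw [pvA_eq s hpre.1, pvAlt_eq s hpre.1]
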